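-- pv_equiv track=rewrite | github.com/yangchao228/ds-matrix-daily | src/content_aggregator.py | aggregate_by_source_diversity
-- ===== SOURCE A (Python) =====
-- from typing import List, Dict, Tuple
--
-- def aggregate_by_source_diversity(articles: List[Dict]) -> List[Dict]:
--     """
--     根据来源多样性聚合文章（避免同一来源的重复报道）
--     :param articles: 文章列表
--     :return: 按来源多样化的文章列表
--     """
--     if not articles:
--         return []
--
--     # 按标题分组，同一标题下保留不同来源的文章
--     title_groups = {}
--     for article in articles:
--         title = article.get('title', '').lower()
--         if title not in title_groups:
--             title_groups[title] = []
--         title_groups[title].append(article)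
--
--     # 从每组中选择不同来源的文章
--     result = []
--     for title, group_articles in title_groups.items():
--         sources_seen = set()
--         for article in group_articles:
--             source = article.get('source', 'Unknown')
--             if source not in sources_seen:
--                 result.append(article)
--                 sources_seen.add(source)
--
--     return result
-- ===== SOURCE B (Python) =====
-- def aggregate_by_source_diversity(articles):
--     # Brute-force scan-back: no dicts/sets; distinct titles in first-occurrence
--     # order, then per title keep an article iff no earlier article in its group
--     # shares its source.
--     titles = []
--     for a in articles:
--         t = a.get('title', '').lower()
--         if t not in titles:
--             titles.append(t)
--     result = []
--     for t in titles:
--         group = [a for a in articles if a.get('title', '').lower() == t]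
--         for i, a in enumerate(group):
--             if all(b.get('source', 'Unknown') != a.get('source', 'Unknown') for b in group[:i]):
--                 result.append(a)
--     return result
-- ===== Notes on version B (the rewrite author's own statement) =====
-- stated objective: alternative
-- what changed: Replaces A's hash-based grouping (dict of lists plus a per-group seen-set) by a brute-force nested-scan algorithm with no dicts or sets at all: distinct titles collected in first-occurrence order by list scan, each group re-filtered from the article list, and an article kept iff no earlier article in its group has the same source (prefix scan); trades O(n) hashing for O(n^2) scanning.
import Mathlib
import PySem

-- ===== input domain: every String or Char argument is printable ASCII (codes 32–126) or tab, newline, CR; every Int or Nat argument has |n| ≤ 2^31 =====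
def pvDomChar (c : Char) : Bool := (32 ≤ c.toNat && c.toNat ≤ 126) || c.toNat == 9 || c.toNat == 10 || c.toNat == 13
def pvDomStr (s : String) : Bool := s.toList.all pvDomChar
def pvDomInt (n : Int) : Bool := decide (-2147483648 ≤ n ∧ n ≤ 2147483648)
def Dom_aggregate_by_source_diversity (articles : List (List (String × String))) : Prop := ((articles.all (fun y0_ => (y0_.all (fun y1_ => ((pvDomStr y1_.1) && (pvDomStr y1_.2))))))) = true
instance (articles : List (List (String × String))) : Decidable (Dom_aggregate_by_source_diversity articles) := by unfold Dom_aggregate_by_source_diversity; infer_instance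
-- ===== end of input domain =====

-- B replaces A's dict-of-lists + seen-set by a brute-force nested-scan algorithm with no dicts or sets (distinct titles by list scan, per-title group re-filtered, keep iff no earlier same-source article in the group); objective: alternative, same return value.


-- shared helpers: article.get('title','').lower() and article.get('source','Unknown')
def pvKey (a : List (String × String)) : String :=
  PySem.Str.lower (PySem.Dict.getD (PySem.Dict.mk a) "title" "")
def pvSrc (a : List (String × String)) : String :=
  PySem.Dict.getD (PySem.Dict.mk a) "source" "Unknown"

-- ===== PORT A =====
-- Two passes: group the articles by lowercased title into a dict of lists,
-- then rescan each group keeping the first article per source (seen-set).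
def aggregate_by_source_diversity (articles : List (List (String × String))) : List (List (String × String)) :=
  if articles.isEmpty then []
  else
    let title_groups : PySem.Dict String (List (List (String × String))) :=
      articles.foldl (fun d article =>
        let title := pvKey article
        let d := if d.contains title then d else d.insert title []
        d.modify title [] (fun g => g ++ [article])) PySem.Dict.empty
    title_groups.items.foldl (fun result p =>
      (p.2.foldl (fun (acc : List (List (String × String)) × PySem.Set String) article =>
          let source := pvSrc article
          if PySem.Set.contains acc.2 source then acc
          else (acc.1 ++ [article], PySem.Set.add acc.2 source))
        (result, PySem.Set.empty)).1) []

-- ===== PORT B =====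
-- Brute-force nested scans, no dicts/sets: distinct titles in first-occurrence
-- order via list membership; per title, filter the group and keep an article
-- iff no earlier article in the group (group[:i]) has the same source.
def aggregate_by_source_diversity_alt (articles : List (List (String × String))) : List (List (String × String)) :=
  let titles : List String := articles.foldl (fun ts a =>
      let t := pvKey a
      if ts.contains t then ts else ts ++ [t]) []
  titles.foldl (fun result t =>
    let group := articles.filter (fun a => pvKey a == t)
    (PySem.List.enumerate group).foldl (fun result p =>
      if (PySem.List.slice group none (some p.1)).all (fun b => !(pvSrc b == pvSrc p.2))
      then result ++ [p.2] else result) result) []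

-- ===== PRECONDITION & SPEC =====
def Spec_aggregate_by_source_diversity (articles : List (List (String × String))) (out : List (List (String × String))) : Prop := out = aggregate_by_source_diversity_alt articles
instance (articles : List (List (String × String))) (out : List (List (String × String))) : Decidable (Spec_aggregate_by_source_diversity articles out) := by unfold Spec_aggregate_by_source_diversity; infer_instance

-- ===== CLAIM (what is proved, stated in full; the proofs are below) =====
def Claim_equal_aggregate_by_source_diversity : Prop := ∀ (articles : List (List (String × String))), Dom_aggregate_by_source_diversity articles → Spec_aggregate_by_source_diversity articles (aggregate_by_source_diversity articles)

-- ===== LEMMAS AND PROOFS =====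

-- common reference form: per-group first-per-source dedup
def pvSDedup (seen : PySem.Set String) : List (List (String × String)) → List (List (String × String))
  | [] => []
  | a :: rest =>
    if PySem.Set.contains seen (pvSrc a) then pvSDedup seen rest
    else a :: pvSDedup (PySem.Set.add seen (pvSrc a)) rest

lemma pv_insert_modify {κ ν : Type} [BEq κ] [LawfulBEq κ] (d : PySem.Dict κ ν) (k : κ) (dflt : ν) (f : ν → ν) :
    (if d.contains k then d else d.insert k dflt).modify k dflt f = d.modify k dflt f := by
  by_cases h : d.contains k = true
  · simp [h]
  · simp only [h, if_false, Bool.false_eq_true, PySem.Dict.modify, PySem.Dict.getD_insert_self,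
      PySem.Dict.insert_insert_self]
    rw [PySem.Dict.getD_of_not_contains d dflt (by simpa using h)]

-- inner fold of A's second pass = pvSDedup
lemma pv_innerA (g : List (List (String × String))) :
    ∀ (acc : List (List (String × String))) (seen : PySem.Set String),
    (g.foldl (fun (acc : List (List (String × String)) × PySem.Set String) article =>
        let source := pvSrc article
        if PySem.Set.contains acc.2 source then acc
        else (acc.1 ++ [article], PySem.Set.add acc.2 source)) (acc, seen)).1
      = acc ++ pvSDedup seen g := by
  induction g with
  | nil => intro acc seen; simp [pvSDedup]
  | cons a rest ih =>
    intro acc seen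
    show (rest.foldl _ (if PySem.Set.contains seen (pvSrc a) then (acc, seen)
        else (acc ++ [a], PySem.Set.add seen (pvSrc a)))).1 = acc ++ pvSDedup seen (a :: rest)
    by_cases h : pvSrc a ∈ seen
    · rw [if_pos ((PySem.Set.contains_iff seen (pvSrc a)).mpr h), ih]
      rw [show pvSDedup seen (a :: rest) = pvSDedup seen rest from by simp [pvSDedup, h]]
    · rw [if_neg (fun hc => h ((PySem.Set.contains_iff seen (pvSrc a)).mp hc)), ih]
      rw [show pvSDedup seen (a :: rest) = a :: pvSDedup (PySem.Set.add seen (pvSrc a)) rest from by simp [pvSDedup, h]]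
      simp

-- A's grouping fold: the group stored at t is the subsequence of articles with lowercase title t
lemma pvA_getD (t : String) (l : List (List (String × String))) :
    ∀ d : PySem.Dict String (List (List (String × String))),
    (l.foldl (fun d a => d.modify (pvKey a) [] (fun g => g ++ [a])) d).getD t []
      = d.getD t [] ++ l.filter (fun a => pvKey a == t) := by
  induction l with
  | nil => intro d; simp
  | cons a l ih =>
    intro d
    rw [List.foldl_cons, ih, PySem.Dict.getD_modify]
    by_cases ht : t = pvKey a
    · subst ht; simp
    · rw [if_neg ht, List.filter_cons, if_neg (by simp; exact fun hh => ht hh.symm)]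

lemma pvA_keys (l : List (List (String × String))) :
    ∀ d : PySem.Dict String (List (List (String × String))),
    (l.foldl (fun d a => d.modify (pvKey a) [] (fun g => g ++ [a])) d).keys
      = PySem.Set.update d.keys (l.map pvKey) := by
  induction l with
  | nil => intro d; simp [PySem.Set.update]
  | cons a l ih =>
    intro d
    rw [List.foldl_cons, ih, List.map_cons, PySem.Set.update_cons]
    by_cases h : d.contains (pvKey a) = true
    · rw [show (d.modify (pvKey a) [] (fun g => g ++ [a])).keys = d.keys from by
        unfold PySem.Dict.modify; exact PySem.Dict.keys_insert_of_contains d _ h]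
      rw [PySem.Set.add_of_mem ((PySem.Dict.contains_iff_mem_keys d _).mp h)]
    · rw [show (d.modify (pvKey a) [] (fun g => g ++ [a])).keys = d.keys ++ [pvKey a] from by
        unfold PySem.Dict.modify; exact PySem.Dict.keys_insert_of_not_contains d _ (by simpa using h)]
      rw [PySem.Set.add_of_not_mem (fun hm => h ((PySem.Dict.contains_iff_mem_keys d _).mpr hm))]

lemma pvA_char (articles : List (List (String × String))) (h : articles.isEmpty = false) :
    aggregate_by_source_diversity articles
      = (PySem.Set.ofList (articles.map pvKey)).flatMap
          (fun t => pvSDedup PySem.Set.empty (articles.filter (fun a => pvKey a == t))) := by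
  unfold aggregate_by_source_diversity
  rw [if_neg (by simp [h])]
  show ((articles.foldl (fun d a =>
      (if d.contains (pvKey a) then d else d.insert (pvKey a) []).modify (pvKey a) [] (fun g => g ++ [a]))
      PySem.Dict.empty).items).foldl _ [] = _
  have hstep : (fun (d : PySem.Dict String (List (List (String × String)))) a =>
      (if d.contains (pvKey a) then d else d.insert (pvKey a) []).modify (pvKey a) [] (fun g => g ++ [a]))
      = fun d a => d.modify (pvKey a) [] (fun g => g ++ [a]) :=
    funext fun d => funext fun a => pv_insert_modify d (pvKey a) [] _
  rw [hstep]
  set d0 := articles.foldl (fun d a => d.modify (pvKey a) [] (fun g => g ++ [a])) PySem.Dict.empty with hd0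
  have hkeys : d0.keys = PySem.Set.ofList (articles.map pvKey) := by
    rw [hd0, pvA_keys articles PySem.Dict.empty, PySem.Dict.keys_empty, PySem.Set.update_nil_left]
  have hnd : d0.keys.Nodup := by rw [hkeys]; exact PySem.Set.nodup_ofList _
  rw [PySem.Dict.items_eq_map_keys d0 hnd [], List.foldl_map, hkeys]
  show (PySem.Set.ofList (articles.map pvKey)).foldl (fun res t =>
      ((d0.getD t []).foldl (fun (acc : List (List (String × String)) × PySem.Set String) article =>
          let source := pvSrc article
          if PySem.Set.contains acc.2 source then acc
          else (acc.1 ++ [article], PySem.Set.add acc.2 source))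
        (res, PySem.Set.empty)).1) [] = _
  rw [show (fun (res : List (List (String × String))) (t : String) =>
      ((d0.getD t []).foldl (fun (acc : List (List (String × String)) × PySem.Set String) article =>
          let source := pvSrc article
          if PySem.Set.contains acc.2 source then acc
          else (acc.1 ++ [article], PySem.Set.add acc.2 source))
        (res, PySem.Set.empty)).1)
      = fun res t => res ++ pvSDedup PySem.Set.empty (d0.getD t []) from
    funext fun res => funext fun t => pv_innerA (d0.getD t []) res PySem.Set.empty]
  rw [PySem.List.foldl_append_eq_flatMap]
  rw [show (fun t => pvSDedup PySem.Set.empty (d0.getD t []))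
      = fun t => pvSDedup PySem.Set.empty (articles.filter (fun a => pvKey a == t)) from
    funext fun t => by rw [hd0, pvA_getD t articles PySem.Dict.empty, PySem.Dict.getD_empty]; simp]
  simp

-- B's inner scan-back over a group g equals pvSDedup with the prefix's sources as seen-set
lemma pvB_inner (g : List (List (String × String))) :
    ∀ (suf pre res : List (List (String × String))),
    g = pre ++ suf →
    (PySem.List.enumerate suf (pre.length : Int)).foldl (fun res p =>
        if (PySem.List.slice g none (some p.1)).all (fun b => !(pvSrc b == pvSrc p.2))
        then res ++ [p.2] else res) res
      = res ++ pvSDedup (PySem.Set.ofList (pre.map pvSrc)) suf := by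
  intro suf
  induction suf with
  | nil => intro pre res _; simp [pvSDedup, PySem.List.enumerate]
  | cons a suf ih =>
    intro pre res hg
    rw [PySem.List.enumerate_cons, List.foldl_cons]
    have hslice : PySem.List.slice g none (some ((pre.length : Nat) : Int)) = pre := by
      rw [PySem.List.slice_to_natCast, hg, List.take_left]
    have hcond : (PySem.List.slice g none (some ((pre.length : Nat) : Int))).all
        (fun b => !(pvSrc b == pvSrc a))
        = !(PySem.Set.contains (PySem.Set.ofList (pre.map pvSrc)) (pvSrc a)) := by
      rw [hslice]
      by_cases hm : pvSrc a ∈ pre.map pvSrc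
      · rw [show PySem.Set.contains (PySem.Set.ofList (pre.map pvSrc)) (pvSrc a) = true from
          (PySem.Set.contains_iff _ _).mpr ((PySem.Set.mem_ofList _ _).mpr hm)]
        simp only [Bool.not_true, List.all_eq_false]
        obtain ⟨b, hb, hbs⟩ := List.mem_map.mp hm
        exact ⟨b, hb, by simp [hbs]⟩
      · rw [show PySem.Set.contains (PySem.Set.ofList (pre.map pvSrc)) (pvSrc a) = false from by
          rcases Bool.eq_false_or_eq_true (PySem.Set.contains (PySem.Set.ofList (pre.map pvSrc)) (pvSrc a)) with h | h
          all_goals first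
            | exact h
            | exact absurd ((PySem.Set.mem_ofList _ _).mp ((PySem.Set.contains_iff _ _).mp h)) hm]
        simp only [Bool.not_false, List.all_eq_true]
        intro b hb
        simp only [Bool.not_eq_eq_eq_not, Bool.not_true, beq_eq_false_iff_ne, ne_eq]
        exact fun he => hm (List.mem_map.mpr ⟨b, hb, he⟩)
    have hpre' : g = (pre ++ [a]) ++ suf := by simpa using hg
    have hlen : ((pre ++ [a]).length : Int) = (pre.length : Int) + 1 := by simp
    have hset : PySem.Set.ofList ((pre ++ [a]).map pvSrc)
        = PySem.Set.add (PySem.Set.ofList (pre.map pvSrc)) (pvSrc a) := by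
      rw [show (pre ++ [a]).map pvSrc = pre.map pvSrc ++ [pvSrc a] from by simp,
          PySem.Set.ofList_eq_foldl, PySem.Set.ofList_eq_foldl, List.foldl_append]
      rfl
    by_cases h : PySem.Set.contains (PySem.Set.ofList (pre.map pvSrc)) (pvSrc a) = true
    · rw [if_neg (by rw [hcond, h]; simp)]
      rw [show pvSDedup (PySem.Set.ofList (pre.map pvSrc)) (a :: suf)
          = pvSDedup (PySem.Set.ofList (pre.map pvSrc)) suf from by simp only [pvSDedup, h, if_true]]
      have hthis := ih (pre ++ [a]) res hpre'
      rw [hlen, hset, PySem.Set.add_of_mem ((PySem.Set.contains_iff _ _).mp h)] at hthis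
      exact hthis
    · rw [if_pos (by rw [hcond]; simpa using h)]
      rw [show pvSDedup (PySem.Set.ofList (pre.map pvSrc)) (a :: suf)
          = a :: pvSDedup (PySem.Set.add (PySem.Set.ofList (pre.map pvSrc)) (pvSrc a)) suf from by
        simp only [pvSDedup]; rw [if_neg h]]
      have hthis := ih (pre ++ [a]) (res ++ [a]) hpre'
      rw [hlen, hset] at hthis
      rw [hthis]
      simp

lemma pvB_char (articles : List (List (String × String))) :
    aggregate_by_source_diversity_alt articles
      = (PySem.Set.ofList (articles.map pvKey)).flatMap
          (fun t => pvSDedup PySem.Set.empty (articles.filter (fun a => pvKey a == t))) := by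
  unfold aggregate_by_source_diversity_alt
  have htitles : articles.foldl (fun ts a =>
      let t := pvKey a
      if ts.contains t then ts else ts ++ [t]) ([] : List String)
      = PySem.Set.ofList (articles.map pvKey) := by
    rw [PySem.Set.ofList_eq_foldl, List.foldl_map]
    rfl
  rw [htitles]
  rw [show (fun (result : List (List (String × String))) (t : String) =>
      let group := articles.filter (fun a => pvKey a == t)
      (PySem.List.enumerate group).foldl (fun result p =>
        if (PySem.List.slice group none (some p.1)).all (fun b => !(pvSrc b == pvSrc p.2))
        then result ++ [p.2] else result) result)
      = fun result t => result ++ pvSDedup PySem.Set.empty (articles.filter (fun a => pvKey a == t)) from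
    funext fun result => funext fun t => by
      have := pvB_inner (articles.filter (fun a => pvKey a == t))
        (articles.filter (fun a => pvKey a == t)) [] result (by simp)
      simpa [PySem.List.enumerate] using this]
  rw [PySem.List.foldl_append_eq_flatMap]
  simp

-- ===== VERDICT (by name: the statement is the Claim_ definition above) =====
theorem aggregate_by_source_diversity_spec : Claim_equal_aggregate_by_source_diversity := by
  intro articles _
  unfold Spec_aggregate_by_source_diversity
  by_cases h : articles.isEmpty = true
  · rw [List.isEmpty_iff.mp h]
    rfl
  · rw [pvA_char articles (by simpa using h), pvB_char articles]
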